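-- pv_equiv track=rewrite | github.com/iQuad427/Projet_RO | solution_construction.py | sort_pareto_three_trucks
-- ===== SOURCE A (Python) =====
-- def sort_pareto_three_trucks(solutions_scores: list):
--     optimal_solutions = []
--     for i in range(len(solutions_scores)):
--         opt = True
--         for j in range(len(solutions_scores)):
--             if solutions_scores[j][1] > solutions_scores[i][1] and solutions_scores[j][2] > solutions_scores[i][2]:
--                 opt = False
--         if opt:
--             optimal_solutions.append(solutions_scores[i][0])
--
--     return optimal_solutions
-- ===== SOURCE B (Python) =====
-- def sort_pareto_three_trucks(solutions_scores: list):
--     # Sort by coord1 descending once; sweep groups of equal coord1, recording for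
--     # each coord1 value the max coord2 seen among strictly greater coord1 values.
--     pts = sorted(solutions_scores, key=lambda t: t[1], reverse=True)
--     max_above = {}   # coord1 value -> max coord2 among points with strictly greater coord1 (None if none)
--     best = None      # max coord2 over all groups already closed (strictly greater coord1)
--     cur_b = None     # coord1 of the current group (None before the first point)
--     cur_max = None   # max coord2 within the current group
--     for (a, b, c) in pts:
--         if cur_b is None or b != cur_b:
--             if cur_max is not None:
--                 best = cur_max if best is None or cur_max > best else best
--             cur_b = b
--             cur_max = c
--             max_above[b] = best
--         else:
--             cur_max = cur_max if cur_max > c else c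
--     return [a for (a, b, c) in solutions_scores
--             if not (max_above[b] is not None and max_above[b] > c)]
-- ===== Notes on version B (the rewrite author's own statement) =====
-- stated objective: faster
-- what changed: Replaced A's all-pairs double loop (for each point, scan every other point for strict domination in both score coordinates) by one descending sort on coord1 plus a single sweep that records, per coord1 value, the maximum coord2 among points with strictly greater coord1; a final pass keeps a point iff that recorded maximum does not exceed its coord2.
import Mathlib
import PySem

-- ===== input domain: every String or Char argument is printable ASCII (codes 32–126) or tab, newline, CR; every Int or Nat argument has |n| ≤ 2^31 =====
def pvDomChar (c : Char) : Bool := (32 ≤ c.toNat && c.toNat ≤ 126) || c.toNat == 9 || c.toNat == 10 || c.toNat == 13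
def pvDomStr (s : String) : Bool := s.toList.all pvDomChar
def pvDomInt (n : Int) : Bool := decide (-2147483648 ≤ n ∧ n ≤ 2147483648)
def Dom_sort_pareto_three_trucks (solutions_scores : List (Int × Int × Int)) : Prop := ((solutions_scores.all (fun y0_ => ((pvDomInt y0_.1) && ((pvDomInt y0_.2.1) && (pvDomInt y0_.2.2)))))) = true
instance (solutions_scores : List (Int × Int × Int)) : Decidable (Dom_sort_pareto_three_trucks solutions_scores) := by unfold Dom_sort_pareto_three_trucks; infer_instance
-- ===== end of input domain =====

-- B replaces A's all-pairs domination test by one sort on coord1 plus a single sweep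
-- recording, per coord1 value, the max coord2 among strictly greater coord1 (objective: faster).

-- ===== PORT A =====
-- literal port of A: for i in range(len): inner flag loop over j; append solutions_scores[i][0] if opt
def sort_pareto_three_trucks (solutions_scores : List (Int × Int × Int)) : List Int :=
  (PySem.List.pyRange 0 (PySem.List.len solutions_scores) 1).foldl (fun optimal_solutions i =>
    if (PySem.List.pyRange 0 (PySem.List.len solutions_scores) 1).foldl (fun opt j =>
        if (PySem.List.pyGetD solutions_scores j (0, 0, 0)).2.1 >
             (PySem.List.pyGetD solutions_scores i (0, 0, 0)).2.1 ∧
           (PySem.List.pyGetD solutions_scores j (0, 0, 0)).2.2 >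
             (PySem.List.pyGetD solutions_scores i (0, 0, 0)).2.2
        then false else opt) true
    then optimal_solutions ++ [(PySem.List.pyGetD solutions_scores i (0, 0, 0)).1]
    else optimal_solutions) []

-- ===== PORT B =====
-- one step of Source B's sweep over the sorted list; state = (max_above, best, cur_b, cur_max)
def pvStep (st : PySem.Dict Int (Option Int) × Option Int × Option Int × Option Int)
    (p : Int × Int × Int) :
    PySem.Dict Int (Option Int) × Option Int × Option Int × Option Int :=
  if st.2.2.1 = none ∨ st.2.2.1 ≠ some p.2.1 then
    -- if cur_max is not None: best = cur_max if best is None or cur_max > best else best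
    (st.1.insert p.2.1
        (match st.2.2.2 with
         | none => st.2.1
         | some m => match st.2.1 with
           | none => some m
           | some bb => if m > bb then some m else some bb),
     (match st.2.2.2 with
      | none => st.2.1
      | some m => match st.2.1 with
        | none => some m
        | some bb => if m > bb then some m else some bb),
     some p.2.1, some p.2.2)
  else
    -- cur_max = cur_max if cur_max > c else c   (cur_b ≠ None here, so cur_max is never
    -- None in this branch; the 'none' case below is unreachable)
    (st.1, st.2.1, st.2.2.1,
      match st.2.2.2 with
      | none => some p.2.2
      | some m => if m > p.2.2 then some m else some p.2.2)

def sort_pareto_three_trucks_alt (solutions_scores : List (Int × Int × Int)) : List Int :=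
  let pts := PySem.List.sorted solutions_scores (fun t => t.2.1) true
  let st := pts.foldl pvStep (PySem.Dict.empty, none, none, none)
  -- max_above[b]: every coord1 of the input is a key of max_above, so getD is exact here
  solutions_scores.foldl (fun acc p =>
    if (match st.1.getD p.2.1 none with
        | some m => decide (m > p.2.2)
        | none => false) then acc
    else acc ++ [p.1]) []

-- ===== PRECONDITION & SPEC =====
def Spec_sort_pareto_three_trucks (solutions_scores : List (Int × Int × Int)) (out : List Int) : Prop := out = sort_pareto_three_trucks_alt solutions_scores
instance (solutions_scores : List (Int × Int × Int)) (out : List Int) : Decidable (Spec_sort_pareto_three_trucks solutions_scores out) := by unfold Spec_sort_pareto_three_trucks; infer_instance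

-- ===== CLAIM (what is proved, stated in full; the proofs are below) =====
def Claim_equal_sort_pareto_three_trucks : Prop := ∀ (solutions_scores : List (Int × Int × Int)), Dom_sort_pareto_three_trucks solutions_scores → Spec_sort_pareto_three_trucks solutions_scores (sort_pareto_three_trucks solutions_scores)

-- ===== LEMMAS AND PROOFS =====

-- option-max (none = no element yet)
def pvMerge : Option Int → Option Int → Option Int
  | o, none => o
  | none, some m => some m
  | some bb, some m => some (max bb m)

-- max of the coord2 values of a list, as an Option
def pvMx : List (Int × Int × Int) → Option Int
  | [] => none
  | q :: t => pvMerge (pvMx t) (some q.2.2)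

theorem pvMerge_none_left (o : Option Int) : pvMerge none o = o := by
  cases o <;> rfl

theorem pvMerge_none_right (o : Option Int) : pvMerge o none = o := rfl

theorem pvMerge_assoc (a b c : Option Int) :
    pvMerge (pvMerge a b) c = pvMerge a (pvMerge b c) := by
  cases a <;> cases b <;> cases c <;> simp [pvMerge] <;> omega

theorem pvMerge_right_swap (a b c : Option Int) :
    pvMerge (pvMerge a b) c = pvMerge (pvMerge a c) b := by
  cases a <;> cases b <;> cases c <;> simp [pvMerge] <;> omega

theorem pvMx_append (xs ys : List (Int × Int × Int)) :
    pvMx (xs ++ ys) = pvMerge (pvMx xs) (pvMx ys) := by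
  induction xs with
  | nil => simp [pvMx, pvMerge_none_left]
  | cons x t ih =>
      simp only [List.cons_append, pvMx, ih]
      rw [pvMerge_right_swap]

theorem pvMx_cons_some (q : Int × Int × Int) (t : List (Int × Int × Int)) :
    ∃ m, pvMx (q :: t) = some m := by
  show ∃ m, pvMerge (pvMx t) (some q.2.2) = some m
  cases pvMx t <;> exact ⟨_, rfl⟩

-- "the option-max exceeds c" as a Bool
def pvGt : Option Int → Int → Bool
  | some m, c => decide (c < m)
  | none, _ => false

theorem pvGt_merge (o₁ o₂ : Option Int) (c : Int) :
    pvGt (pvMerge o₁ o₂) c = (pvGt o₁ c || pvGt o₂ c) := by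
  cases o₁ <;> cases o₂ <;> simp [pvMerge, pvGt]

theorem pvGt_mx (xs : List (Int × Int × Int)) (c : Int) :
    pvGt (pvMx xs) c = xs.any (fun q => decide (c < q.2.2)) := by
  induction xs with
  | nil => rfl
  | cons x t ih =>
      show pvGt (pvMerge (pvMx t) (some x.2.2)) c = _
      rw [pvGt_merge, ih]
      simp [pvGt, Bool.or_comm]

-- partition of the max over "coord1 > b" / "coord1 = b" when every coord1 is ≥ b
theorem pvMx_partition (P : List (Int × Int × Int)) (b : Int)
    (h : ∀ q ∈ P, b ≤ q.2.1) :
    pvMx P = pvMerge (pvMx (P.filter (fun q => decide (b < q.2.1))))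
                     (pvMx (P.filter (fun q => decide (q.2.1 = b)))) := by
  induction P with
  | nil => rfl
  | cons x t ih =>
      have hx : b ≤ x.2.1 := h x (by simp)
      have ht : ∀ q ∈ t, b ≤ q.2.1 := fun q hq => h q (by simp [hq])
      rcases lt_or_eq_of_le hx with hlt | heq
      · have hne : ¬ (x.2.1 = b) := by omega
        simp only [pvMx, List.filter_cons, decide_eq_true hlt, decide_eq_false hne,
          ite_true, ite_false, Bool.false_eq_true, ih ht]
        rw [pvMerge_right_swap]
      · have hb : x.2.1 = b := heq.symm
        have hnlt : ¬ (b < x.2.1) := by omega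
        simp only [pvMx, List.filter_cons, decide_eq_false hnlt, decide_eq_true hb,
          Bool.false_eq_true, if_false, if_true, ih ht, pvMx]
        rw [pvMerge_assoc]

-- the invariant of Source B's sweep, relative to the processed prefix P
def pvInv (P : List (Int × Int × Int))
    (st : PySem.Dict Int (Option Int) × Option Int × Option Int × Option Int) : Prop :=
  (∀ b ∈ P.map (fun q => q.2.1),
      st.1.getD b none = pvMx (P.filter (fun q => decide (b < q.2.1)))) ∧
  (match P.getLast? with
   | none => st = (PySem.Dict.empty, none, none, none)
   | some e =>
      st.2.2.1 = some e.2.1 ∧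
      st.2.2.2 = pvMx (P.filter (fun q => decide (q.2.1 = e.2.1))) ∧
      st.2.1 = pvMx (P.filter (fun q => decide (e.2.1 < q.2.1))))

theorem pv_last_le (P : List (Int × Int × Int)) (e : Int × Int × Int)
    (hs : List.Pairwise (fun a b => b.2.1 ≤ a.2.1) P)
    (hl : P.getLast? = some e) : ∀ q ∈ P, e.2.1 ≤ q.2.1 := by
  obtain ⟨l', rfl⟩ := List.getLast?_eq_some_iff.mp hl
  intro q hq
  rcases List.mem_append.mp hq with h | h
  · exact (List.pairwise_append.mp hs).2.2 q h e (by simp)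
  · simp only [List.mem_singleton] at h
    exact h ▸ le_refl _

theorem pvStep_inv (P : List (Int × Int × Int)) (e : Int × Int × Int)
    (st : PySem.Dict Int (Option Int) × Option Int × Option Int × Option Int)
    (hs : List.Pairwise (fun a b => b.2.1 ≤ a.2.1) (P ++ [e]))
    (hinv : pvInv P st) : pvInv (P ++ [e]) (pvStep st e) := by
  obtain ⟨d, best, cb, cm⟩ := st
  have hPe : ∀ q ∈ P, e.2.1 ≤ q.2.1 := fun q hq =>
    (List.pairwise_append.mp hs).2.2 q hq e (by simp)
  cases hP : P.getLast? with
  | none =>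
      -- P = []
      have hPnil : P = [] := List.getLast?_eq_none_iff.mp hP
      subst hPnil
      have hst : (d, best, cb, cm) = ((PySem.Dict.empty : PySem.Dict Int (Option Int)), none, none, none) := by
        have := hinv.2
        simpa [pvInv] using this
      simp only [Prod.mk.injEq] at hst
      obtain ⟨hd, hbest, hcb, hcm⟩ := hst
      subst hd hbest hcb hcm
      constructor
      · intro b hb
        simp only [List.nil_append, List.map_cons, List.map_nil, List.mem_singleton] at hb
        subst hb
        have : ¬ (e.2.1 < e.2.1) := lt_irrefl _
        simp [pvStep, PySem.Dict.getD_insert, pvMx]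
      · simp only [List.nil_append, List.getLast?_singleton]
        have : ¬ (e.2.1 < e.2.1) := lt_irrefl _
        simp [pvStep, pvMx, pvMerge]
  | some e0 =>
      have hb0 : ∀ q ∈ P, e0.2.1 ≤ q.2.1 :=
        pv_last_le P e0 (List.pairwise_append.mp hs).1 hP
      have he0P : e0 ∈ P := by
        obtain ⟨l', hl'⟩ := List.getLast?_eq_some_iff.mp hP
        simp [hl']
      obtain ⟨hd, hcb, hcm, hbest⟩ :
          (∀ b ∈ P.map (fun q => q.2.1),
              d.getD b none = pvMx (P.filter (fun q => decide (b < q.2.1)))) ∧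
          cb = some e0.2.1 ∧
          cm = pvMx (P.filter (fun q => decide (q.2.1 = e0.2.1))) ∧
          best = pvMx (P.filter (fun q => decide (e0.2.1 < q.2.1))) := by
        have h1 := hinv.1
        have h2 := hinv.2
        rw [hP] at h2
        exact ⟨h1, h2.1, h2.2.1, h2.2.2⟩
      -- cur_max is some: the current group contains e0
      obtain ⟨m, hm⟩ : ∃ m, pvMx (P.filter (fun q => decide (q.2.1 = e0.2.1))) = some m := by
        have : e0 ∈ P.filter (fun q => decide (q.2.1 = e0.2.1)) :=
          List.mem_filter.mpr ⟨he0P, by simp⟩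
        cases hf : P.filter (fun q => decide (q.2.1 = e0.2.1)) with
        | nil => rw [hf] at this; simp at this
        | cons q t => exact pvMx_cons_some q t
      have hble : e.2.1 ≤ e0.2.1 := hPe e0 he0P
      rw [hm] at hcm
      subst hcb hcm
      by_cases heq : e.2.1 = e0.2.1
      · -- same group: else branch
        have hcond : ¬ ((some e0.2.1 : Option Int) = none ∨ (some e0.2.1 : Option Int) ≠ some e.2.1) := by
          rw [heq]; simp
        have hstep : pvStep (d, best, some e0.2.1, some m) e =
            (d, best, some e0.2.1, if m > e.2.2 then some m else some e.2.2) := by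
          simp only [pvStep]
          rw [if_neg hcond]
        rw [hstep]
        constructor
        · intro b hb
          have hbP : b ∈ P.map (fun q => q.2.1) := by
            simp only [List.map_append, List.map_cons, List.map_nil, List.mem_append,
              List.mem_singleton] at hb
            rcases hb with h | h
            · exact h
            · subst h
              exact List.mem_map.mpr ⟨e0, he0P, heq.symm⟩
          have hbge : e0.2.1 ≤ b := by
            obtain ⟨q, hq, hqb⟩ := List.mem_map.mp hbP
            exact hqb ▸ hb0 q hq
          have hfe : ¬ (b < e.2.1) := by omega
          rw [List.filter_append, pvMx_append]
          simp only [List.filter_cons, decide_eq_false hfe, Bool.false_eq_true, if_false,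
            List.filter_nil, pvMx]
          exact hd b hbP
        · rw [List.getLast?_concat]
          refine ⟨by simp [heq], ?_, ?_⟩
          · rw [List.filter_append, pvMx_append, heq, hm]
            show (if m > e.2.2 then some m else some e.2.2)
              = pvMerge (some m) (pvMx ([e].filter (fun q => decide (q.2.1 = e0.2.1))))
            have hfe : (e.2.1 = e0.2.1) := heq
            simp only [List.filter_cons, decide_eq_true hfe, if_true, List.filter_nil, pvMx,
              pvMerge]
            split <;> simp <;> omega
          · rw [hbest, heq]
            rw [List.filter_append, pvMx_append]
            have hfe : ¬ (e0.2.1 < e.2.1) := by omega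
            simp only [List.filter_cons, decide_eq_false hfe, Bool.false_eq_true, if_false,
              List.filter_nil, pvMx]
            rfl
      · -- new group: then branch
        have hblt : e.2.1 < e0.2.1 := lt_of_le_of_ne hble heq
        have hcond : ((some e0.2.1 : Option Int) = none ∨ (some e0.2.1 : Option Int) ≠ some e.2.1) := by
          right; simp; omega
        have hallgt : ∀ q ∈ P, e.2.1 < q.2.1 := fun q hq => lt_of_lt_of_le hblt (hb0 q hq)
        have hfilterP : P.filter (fun q => decide (e.2.1 < q.2.1)) = P :=
          List.filter_eq_self.mpr (fun q hq => decide_eq_true (hallgt q hq))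
        have hpart := pvMx_partition P e0.2.1 hb0
        rw [hm] at hpart
        clear hinv
        have main : ∀ (B : Option Int), B = pvMx P →
            pvInv (P ++ [e]) (d.insert e.2.1 B, B, some e.2.1, some e.2.2) := by
          intro B hB
          constructor
          · intro b hb
            simp only [List.map_append, List.map_cons, List.map_nil, List.mem_append,
              List.mem_singleton] at hb
            rw [List.filter_append, pvMx_append]
            rcases hb with h | h
            · have hbge : e0.2.1 ≤ b := by
                obtain ⟨q, hq, hqb⟩ := List.mem_map.mp h
                exact hqb ▸ hb0 q hq
              have hbne : b ≠ e.2.1 := by omega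
              have hfe : ¬ (b < e.2.1) := by omega
              rw [PySem.Dict.getD_insert, if_neg hbne]
              simp only [List.filter_cons, decide_eq_false hfe, Bool.false_eq_true, if_false,
                List.filter_nil, pvMx]
              exact hd b h
            · subst h
              have hfe : ¬ (e.2.1 < e.2.1) := lt_irrefl _
              rw [PySem.Dict.getD_insert, if_pos rfl]
              simp only [List.filter_cons, decide_eq_false hfe, Bool.false_eq_true, if_false,
                List.filter_nil, pvMx, hfilterP]
              rw [hB, pvMerge_none_right]
          · rw [List.getLast?_concat]
            refine ⟨rfl, ?_, ?_⟩
            · rw [List.filter_append]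
              have hPnone : P.filter (fun q => decide (q.2.1 = e.2.1)) = [] := by
                rw [List.filter_eq_nil_iff]
                intro q hq
                have := hallgt q hq
                simp
                omega
              rw [hPnone]
              simp [pvMx, pvMerge_none_left]
            · rw [List.filter_append, pvMx_append]
              have hfe : ¬ (e.2.1 < e.2.1) := lt_irrefl _
              simp only [List.filter_cons, decide_eq_false hfe, Bool.false_eq_true, if_false,
                List.filter_nil, pvMx, hfilterP]
              rw [hB, pvMerge_none_right]
        cases best with
        | none =>
            have hstep : pvStep (d, none, some e0.2.1, some m) e =
                (d.insert e.2.1 (some m), some m, some e.2.1, some e.2.2) := by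
              simp only [pvStep]
              rw [if_pos hcond]
            rw [hstep]
            exact main (some m) (by rw [hpart, ← hbest, pvMerge_none_left])
        | some bb =>
            have hstep : pvStep (d, some bb, some e0.2.1, some m) e =
                (d.insert e.2.1 (if m > bb then some m else some bb),
                 (if m > bb then some m else some bb), some e.2.1, some e.2.2) := by
              simp only [pvStep]
              rw [if_pos hcond]
            rw [hstep]
            refine main _ ?_
            rw [hpart, ← hbest]
            show (if m > bb then some m else some bb) = pvMerge (some bb) (some m)
            simp only [pvMerge]
            split <;> simp <;> omega

theorem pv_sweep (rest P : List (Int × Int × Int))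
    (st : PySem.Dict Int (Option Int) × Option Int × Option Int × Option Int)
    (hs : List.Pairwise (fun a b => b.2.1 ≤ a.2.1) (P ++ rest))
    (hinv : pvInv P st) : pvInv (P ++ rest) (rest.foldl pvStep st) := by
  induction rest generalizing P st with
  | nil => simpa using hinv
  | cons e r ih =>
      have h1 : List.Pairwise (fun a b => b.2.1 ≤ a.2.1) ((P ++ [e]) ++ r) := by
        simpa [List.append_assoc] using hs
      have h2 := pvStep_inv P e st (List.pairwise_append.mp h1).1 hinv
      have := ih (P ++ [e]) (pvStep st e) h1 h2
      simpa [List.append_assoc] using this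

-- the final dict maps each coord1 b of the input to the option-max of coord2 over strictly greater coord1
theorem pv_dict_spec (l : List (Int × Int × Int)) (b : Int)
    (hb : b ∈ l.map (fun q => q.2.1)) :
    ((PySem.List.sorted l (fun t => t.2.1) true).foldl pvStep
        (PySem.Dict.empty, none, none, none)).1.getD b none
      = pvMx ((PySem.List.sorted l (fun t => t.2.1) true).filter
          (fun q => decide (b < q.2.1))) := by
  have hperm := PySem.List.sorted_perm l (fun t => t.2.1) true
  have hs := PySem.List.sorted_pairwise_rev l (fun t => t.2.1)
  have hmain := pv_sweep (PySem.List.sorted l (fun t => t.2.1) true) []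
    (PySem.Dict.empty, none, none, none) (by simpa using hs)
    (by constructor
        · intro b hb; simp at hb
        · simp)
  simp only [List.nil_append] at hmain
  exact hmain.1 b (by
    simp only [List.mem_map] at hb ⊢
    obtain ⟨q, hq, hqb⟩ := hb
    exact ⟨q, hperm.mem_iff.mpr hq, hqb⟩)

-- A's inner flag loop computes "no point of l dominates p"
theorem pv_flag (l : List (Int × Int × Int)) (p : Int × Int × Int) (b : Bool) :
    l.foldl (fun opt q => if q.2.1 > p.2.1 ∧ q.2.2 > p.2.2 then false else opt) b
      = (b && l.all (fun q => !(decide (p.2.1 < q.2.1) && decide (p.2.2 < q.2.2)))) := by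
  induction l generalizing b with
  | nil => simp
  | cons x t ih =>
      simp only [List.foldl_cons, List.all_cons]
      by_cases h : x.2.1 > p.2.1 ∧ x.2.2 > p.2.2
      · rw [if_pos h, ih]
        simp [decide_eq_true h.1, decide_eq_true h.2]
      · rw [if_neg h, ih]
        have : (!(decide (p.2.1 < x.2.1) && decide (p.2.2 < x.2.2))) = true := by
          simp only [Bool.not_eq_true', Bool.and_eq_false_iff]
          rcases not_and_or.mp h with h1 | h1
          · exact Or.inl (decide_eq_false h1)
          · exact Or.inr (decide_eq_false h1)
        rw [this, Bool.true_and]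

-- the two keep-conditions agree on members of l
theorem pv_cond_eq (l : List (Int × Int × Int)) (p : Int × Int × Int) (hp : p ∈ l) :
    (l.foldl (fun opt q => if q.2.1 > p.2.1 ∧ q.2.2 > p.2.2 then false else opt) true)
      = !(match ((PySem.List.sorted l (fun t => t.2.1) true).foldl pvStep
            (PySem.Dict.empty, none, none, none)).1.getD p.2.1 none with
          | some m => decide (m > p.2.2)
          | none => false) := by
  have hb : p.2.1 ∈ l.map (fun q => q.2.1) := List.mem_map.mpr ⟨p, hp, rfl⟩
  rw [pv_flag, pv_dict_spec l p.2.1 hb, Bool.true_and]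
  have hperm := PySem.List.sorted_perm l (fun t => t.2.1) true
  have hmatch : (match pvMx ((PySem.List.sorted l (fun t => t.2.1) true).filter
      (fun q => decide (p.2.1 < q.2.1))) with
      | some m => decide (m > p.2.2)
      | none => false)
      = pvGt (pvMx ((PySem.List.sorted l (fun t => t.2.1) true).filter
          (fun q => decide (p.2.1 < q.2.1)))) p.2.2 := by
    cases pvMx ((PySem.List.sorted l (fun t => t.2.1) true).filter
      (fun q => decide (p.2.1 < q.2.1))) <;> rfl
  rw [hmatch, pvGt_mx]
  rw [List.any_filter]
  have hany : ((PySem.List.sorted l (fun t => t.2.1) true).any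
        (fun q => decide (p.2.1 < q.2.1) && decide (p.2.2 < q.2.2)))
      = l.any (fun q => decide (p.2.1 < q.2.1) && decide (p.2.2 < q.2.2)) := by
    rcases hall : l.any (fun q => decide (p.2.1 < q.2.1) && decide (p.2.2 < q.2.2)) with _ | _
    · rw [List.any_eq_false] at hall ⊢
      intro q hq
      exact hall q (hperm.mem_iff.mp hq)
    · rw [List.any_eq_true] at hall ⊢
      obtain ⟨q, hq, h⟩ := hall
      exact ⟨q, hperm.mem_iff.mpr hq, h⟩
  rw [hany]
  rcases hA : l.any (fun q => decide (p.2.1 < q.2.1) && decide (p.2.2 < q.2.2)) with _ | _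
  · simp only [Bool.not_false]
    rw [List.all_eq_true]
    intro q hq
    have h := List.any_eq_false.mp hA q hq
    simp only [Bool.not_eq_true']
    simpa using h
  · simp only [Bool.not_true]
    rw [List.all_eq_false]
    obtain ⟨q, hq, h⟩ := List.any_eq_true.mp hA
    exact ⟨q, hq, by simpa using h⟩

-- ===== VERDICT (by name: the statement is the Claim_ definition above) =====
theorem sort_pareto_three_trucks_spec : Claim_equal_sort_pareto_three_trucks := by
  intro l _
  unfold Spec_sort_pareto_three_trucks
  simp only [sort_pareto_three_trucks, sort_pareto_three_trucks_alt]
  rw [PySem.List.foldl_pyRange_zero_pyGetD l ((0, 0, 0) : Int × Int × Int)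
    (fun acc pi =>
      if (PySem.List.pyRange 0 (PySem.List.len l) 1).foldl (fun opt j =>
          if (PySem.List.pyGetD l j ((0, 0, 0) : Int × Int × Int)).2.1 > pi.2.1 ∧
             (PySem.List.pyGetD l j ((0, 0, 0) : Int × Int × Int)).2.2 > pi.2.2
          then false else opt) true
      then acc ++ [pi.1] else acc) []]
  apply PySem.List.foldl_congr_mem
  intro acc p hp
  rw [PySem.List.foldl_pyRange_zero_pyGetD l ((0, 0, 0) : Int × Int × Int)
    (fun opt pj => if pj.2.1 > p.2.1 ∧ pj.2.2 > p.2.2 then false else opt) true]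
  rw [pv_cond_eq l p hp]
  generalize (match ((PySem.List.sorted l (fun t => t.2.1) true).foldl pvStep
      (PySem.Dict.empty, none, none, none)).1.getD p.2.1 none with
    | some m => decide (m > p.2.2)
    | none => false) = c
  cases c <;> simp
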